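-- pv_equiv track=rewrite | github.com/troncho111/TicketSense | main.py | expand_hierarchical_mapping
-- ===== SOURCE A (Python) =====
-- from typing import Dict, List, Optional
--
-- def expand_hierarchical_mapping(mapping: Dict[str, List[str]]) -> Dict[str, List[str]]:
--     """Expand parent categories to include all blocks from their child categories.
--
--     Structure: Parent categories have empty arrays [], followed by child categories with blocks.
--     Example:
--         "CATEGORY 1 NORMAL": []     <- Parent (empty)
--         "LONGSIDE 3RD TIER": [501, 502...]  <- Child (has blocks)
--         "SHORTSIDE 3RD TIER": [513, 514...]  <- Child (has blocks)
--         "CATEGORY 2 NORMAL": []     <- Next Parent (empty)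
--     """
--     expanded = {}
--     current_parent = None
--     parent_blocks = []
--
--     for key, blocks in mapping.items():
--         if blocks == [] or blocks is None:
--             # This is a parent category - save previous parent first
--             if current_parent is not None:
--                 expanded[current_parent] = parent_blocks
--             current_parent = key
--             parent_blocks = []
--         else:
--             # This is a child category with blocks
--             expanded[key] = blocks
--             if current_parent is not None:
--                 parent_blocks.extend(blocks)
--
--     # Save last parent
--     if current_parent is not None:
--         expanded[current_parent] = parent_blocks
--
--     return expanded
-- ===== SOURCE B (Python) =====
-- from typing import Dict, List
--
--
-- def expand_hierarchical_mapping(mapping: Dict[str, List[str]]) -> Dict[str, List[str]]: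
--     """Segment-based rewrite: split the items at each parent (falsy blocks) key,
--     then emit each segment's children followed by the parent with their
--     concatenated blocks."""
--
--     def split(items):
--         # longest prefix of child (non-empty blocks) entries, and the remainder
--         for j, (_, blocks) in enumerate(items):
--             if not blocks:
--                 return items[:j], items[j:]
--         return items, []
--
--     orphans, rest = split(list(mapping.items()))
--     out = dict(orphans)  # leading children attached to no parent
--     while rest:
--         parent = rest[0][0]
--         children, rest = split(rest[1:])
--         out.update(children)
--         out[parent] = [b for _, blocks in children for b in blocks]
--     return out
-- ===== Notes on version B (the rewrite author's own statement) =====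
-- stated objective: alternative
-- what changed: Replaces A's single accumulator loop carrying (current parent, accumulated blocks) mutable state with a segment decomposition: a split helper cuts the items at each parent key, and each segment is emitted as its children followed by the parent mapped to the concatenation of their block lists.
import Mathlib
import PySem

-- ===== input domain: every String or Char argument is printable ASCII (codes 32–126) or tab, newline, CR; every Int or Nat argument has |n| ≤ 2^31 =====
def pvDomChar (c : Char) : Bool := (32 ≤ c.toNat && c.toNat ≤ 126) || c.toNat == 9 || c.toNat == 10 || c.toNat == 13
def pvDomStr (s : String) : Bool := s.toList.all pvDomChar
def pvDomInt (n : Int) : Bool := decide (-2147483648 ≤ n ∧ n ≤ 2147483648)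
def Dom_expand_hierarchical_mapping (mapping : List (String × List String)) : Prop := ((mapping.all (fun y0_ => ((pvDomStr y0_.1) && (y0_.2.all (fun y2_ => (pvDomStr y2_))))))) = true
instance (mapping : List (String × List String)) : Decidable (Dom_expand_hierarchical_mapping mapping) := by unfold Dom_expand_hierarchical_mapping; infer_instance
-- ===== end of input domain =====

-- B replaces A's single accumulator loop by a split-into-segments decomposition; return values only
-- (A stores references to the caller's block lists, as does B — neither mutates the input).

-- ===== PORT A =====
-- one fold step of A's loop over mapping.items(); state = (expanded, current_parent, parent_blocks)
def pvStepA (st : PySem.Dict String (List String) × Option String × List String)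
    (kv : String × List String) :
    PySem.Dict String (List String) × Option String × List String :=
  if kv.2 = [] then
    -- parent category: save previous parent first
    match st.2.1 with
    | some p => (st.1.insert p st.2.2, some kv.1, ([] : List String))
    | none => (st.1, some kv.1, ([] : List String))
  else
    -- child category with blocks
    (st.1.insert kv.1 kv.2, st.2.1,
      match st.2.1 with
      | some _ => st.2.2 ++ kv.2
      | none => st.2.2)

def expand_hierarchical_mapping (mapping : List (String × List String)) : List (String × List String) :=
  let st := mapping.foldl pvStepA (PySem.Dict.empty, none, [])
  -- save last parent
  (match st.2.1 with
   | some p => st.1.insert p st.2.2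
   | none => st.1).items

-- ===== PORT B =====
-- Source B's split(): longest prefix of child entries (non-empty blocks), and the remainder
def pvSplit (items : List (String × List String)) :
    List (String × List String) × List (String × List String) :=
  match List.findIdx? (fun kv => kv.2.isEmpty) items with
  | some j => (items.take j, items.drop j)
  | none => (items, [])

theorem pvSplit_snd_length_le (items : List (String × List String)) :
    (pvSplit items).2.length ≤ items.length := by
  unfold pvSplit
  cases h : List.findIdx? (fun kv => kv.2.isEmpty) items with
  | none => simp
  | some j => simp

-- Source B's while-loop over the remaining segments
def pvSegLoop (out : PySem.Dict String (List String))
    (rest : List (String × List String)) : PySem.Dict String (List String) :=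
  match rest with
  | [] => out
  | kv :: tl =>
    let s := pvSplit tl
    pvSegLoop ((out.update s.1).insert kv.1 (s.1.flatMap (·.2))) s.2
termination_by rest.length
decreasing_by
  have := pvSplit_snd_length_le tl
  simp only [List.length_cons]; omega

def expand_hierarchical_mapping_alt (mapping : List (String × List String)) :
    List (String × List String) :=
  let s := pvSplit mapping
  (pvSegLoop (PySem.Dict.ofList s.1) s.2).items

-- ===== PRECONDITION & SPEC =====
def Spec_expand_hierarchical_mapping (mapping : List (String × List String)) (out : List (String × List String)) : Prop := out = expand_hierarchical_mapping_alt mapping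
instance (mapping : List (String × List String)) (out : List (String × List String)) : Decidable (Spec_expand_hierarchical_mapping mapping out) := by unfold Spec_expand_hierarchical_mapping; infer_instance

-- ===== CLAIM (what is proved, stated in full; the proofs are below) =====
def Claim_equal_expand_hierarchical_mapping : Prop := ∀ (mapping : List (String × List String)), Dom_expand_hierarchical_mapping mapping → Spec_expand_hierarchical_mapping mapping (expand_hierarchical_mapping mapping)

-- ===== LEMMAS AND PROOFS =====

-- structural equations for pvSplit
theorem pvSplit_nil : pvSplit [] = ([], []) := rfl

theorem pvSplit_cons_parent (kv : String × List String) (tl : List (String × List String))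
    (h : kv.2 = []) : pvSplit (kv :: tl) = ([], kv :: tl) := by
  unfold pvSplit
  simp [List.findIdx?_cons, h]

theorem pvSplit_cons_child (kv : String × List String) (tl : List (String × List String))
    (h : kv.2 ≠ []) :
    pvSplit (kv :: tl) = (kv :: (pvSplit tl).1, (pvSplit tl).2) := by
  unfold pvSplit
  have hb : (kv.2.isEmpty) = false := by simpa using h
  rw [List.findIdx?_cons, hb]
  cases hf : List.findIdx? (fun kv => kv.2.isEmpty) tl with
  | none => simp
  | some j => simp

-- A's finalization step (the trailing "save last parent")
def pvFinA (st : PySem.Dict String (List String) × Option String × List String) :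
    PySem.Dict String (List String) :=
  match st.2.1 with
  | some p => st.1.insert p st.2.2
  | none => st.1

-- A's loop from a state with a current parent equals one B segment step
theorem pvFoldA_some (l : List (String × List String)) :
    ∀ (exp : PySem.Dict String (List String)) (p : String) (pb : List String),
    pvFinA (l.foldl pvStepA (exp, some p, pb)) =
      pvSegLoop ((exp.update (pvSplit l).1).insert p (pb ++ (pvSplit l).1.flatMap (·.2)))
        (pvSplit l).2 := by
  induction l with
  | nil =>
    intro exp p pb
    simp [pvSplit_nil, pvSegLoop, pvFinA, PySem.Dict.update]
  | cons kv tl ih =>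
    intro exp p pb
    by_cases h : kv.2 = []
    · rw [pvSplit_cons_parent kv tl h]
      simp only [List.foldl_cons, pvStepA, if_pos h]
      rw [ih]
      conv_rhs => rw [pvSegLoop]
      simp [PySem.Dict.update]
    · rw [pvSplit_cons_child kv tl h]
      simp only [List.foldl_cons, pvStepA, if_neg h]
      rw [ih]
      simp [PySem.Dict.update, List.flatMap_cons, List.append_assoc]

-- A's loop from the initial (no parent yet) state equals B's orphan pass + segment loop
theorem pvFoldA_none (l : List (String × List String)) :
    ∀ (exp : PySem.Dict String (List String)),
    pvFinA (l.foldl pvStepA (exp, none, [])) =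
      pvSegLoop (exp.update (pvSplit l).1) (pvSplit l).2 := by
  induction l with
  | nil =>
    intro exp
    simp [pvSplit_nil, pvSegLoop, pvFinA, PySem.Dict.update]
  | cons kv tl ih =>
    intro exp
    by_cases h : kv.2 = []
    · rw [pvSplit_cons_parent kv tl h]
      simp only [List.foldl_cons, pvStepA, if_pos h]
      rw [pvFoldA_some tl]
      conv_rhs => rw [pvSegLoop]
      simp [PySem.Dict.update]
    · rw [pvSplit_cons_child kv tl h]
      simp only [List.foldl_cons, pvStepA, if_neg h]
      rw [ih]
      simp [PySem.Dict.update]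

-- ===== VERDICT (by name: the statement is the Claim_ definition above) =====
theorem expand_hierarchical_mapping_spec : Claim_equal_expand_hierarchical_mapping := by
  intro mapping _
  unfold Spec_expand_hierarchical_mapping expand_hierarchical_mapping expand_hierarchical_mapping_alt
  show (pvFinA (mapping.foldl pvStepA (PySem.Dict.empty, none, []))).items = _
  rw [pvFoldA_none mapping]
  rfl
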